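-- pv_equiv track=rewrite | github.com/lucabubi/Computational-Intelligence | Quixo/game.py | check_repeated_pattern
-- ===== SOURCE A (Python) =====
-- def check_repeated_pattern(move_history: list, pattern_length: int = 10) -> bool:
--     '''Check if the game is a draw due to a repeated pattern of moves. Returns True if a (pattern_length) pattern is found, False otherwise'''
--     if len(move_history) < 2 * pattern_length:
--         return False
--     last_sequence = move_history[-pattern_length:] # extract the last pattern_length sequence of moves
--     for i in range(len(move_history) - 2 * pattern_length):
--         if move_history[i:i + pattern_length] == last_sequence:
--             return True
--     return False
-- ===== SOURCE B (Python) =====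
-- def check_repeated_pattern(move_history: list, pattern_length: int = 10) -> bool:
--     '''True iff the last pattern_length moves already occur as a block starting before
--     the final 2*pattern_length moves. Uses a KMP prefix-function pass over
--     pattern + [None] + searchable-prefix (None separates, as it equals no move), O(n).
--     A non-positive pattern_length has no pattern: False.'''
--     n = len(move_history)
--     if pattern_length <= 0 or n < 2 * pattern_length:
--         return False
--     pattern = move_history[n - pattern_length:]
--     text = move_history[:n - pattern_length - 1]
--     s = pattern + [None] + text
--     pi = [0] * len(s)
--     k = 0
--     for i in range(1, len(s)):
--         while k > 0 and s[i] != s[k]: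
--             k = pi[k - 1]
--         if s[i] == s[k]:
--             k += 1
--         pi[i] = k
--         if k == pattern_length:
--             return True
--     return False
-- ===== Notes on version B (the rewrite author's own statement) =====
-- stated objective: alternative
-- what changed: A's loop that re-slices and compares a length-m block at every start position is replaced by the classic KMP trick: one prefix-function (failure-table) pass over pattern + [None] + searchable-prefix, reporting a repeat as soon as the running border length reaches pattern_length, plus an explicit non-positive-length guard.
-- intended difference: For pattern_length < 0, A's value is an accident of Python's negative-slice wraparound (it can return True although no block repeats), while B returns False, the intended value since no pattern of negative length exists. — e.g. on check_repeated_pattern([], -1): A returns true, B returns false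
import Mathlib
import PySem

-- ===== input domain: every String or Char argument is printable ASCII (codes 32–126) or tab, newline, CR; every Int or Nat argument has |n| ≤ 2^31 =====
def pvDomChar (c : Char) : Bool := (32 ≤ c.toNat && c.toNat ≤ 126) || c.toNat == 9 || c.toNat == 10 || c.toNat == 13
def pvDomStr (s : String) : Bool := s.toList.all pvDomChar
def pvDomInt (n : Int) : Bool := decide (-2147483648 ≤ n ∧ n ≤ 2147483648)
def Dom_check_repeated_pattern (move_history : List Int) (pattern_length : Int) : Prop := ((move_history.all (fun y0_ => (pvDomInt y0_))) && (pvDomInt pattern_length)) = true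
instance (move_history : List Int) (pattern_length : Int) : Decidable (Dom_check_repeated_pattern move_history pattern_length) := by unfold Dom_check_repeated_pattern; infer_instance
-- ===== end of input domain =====

-- B replaces A's loop of per-position slice comparisons by a single KMP
-- prefix-function pass over pattern + [None] + searchable-prefix (None matches no move,
-- so it is an exact separator): a genuinely different algorithm, not claimed faster;
-- B returns False for pattern_length < 0 where A's value is slice-wraparound noise
-- (see D_ below).

-- ===== PORT A =====
def check_repeated_pattern (move_history : List Int) (pattern_length : Int) : Bool :=
  if (move_history.length : Int) < 2 * pattern_length then false
  else
    let last_sequence := PySem.List.slice move_history (some (-pattern_length)) none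
    (PySem.List.pyRange 0 ((move_history.length : Int) - 2 * pattern_length)).any
      (fun i => PySem.List.slice move_history (some i) (some (i + pattern_length)) == last_sequence)

-- ===== PORT B =====
-- Source B's inner while-loop (fallback along the prefix table) fused with the following
-- `if s[i]==s[k]: k+=1`; the fuel argument (= the entering k) only makes the strictly
-- decreasing fallback chain structurally terminating, it never runs out on real data.
def kmpStep (s : List (Option Int)) (pi : List Nat) (c : Option Int) : Nat → Nat → Nat
  | _, 0 => if c = s.getD 0 none then 1 else 0
  | 0, _ + 1 => 0
  | fuel + 1, k + 1 =>
    if c = s.getD (k + 1) none then k + 2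
    else kmpStep s pi c fuel (pi.getD k 0)

-- Source B's for-loop over i in range(1, len(s)): pi collects the prefix-function values,
-- k is the running value; early-returns true as soon as k hits m.
def kmpLoop (s : List (Option Int)) (m : Nat) : Nat → List Nat → Nat → Bool
  | i, pi, k =>
    if _h : i < s.length then
      let k' := kmpStep s pi (s.getD i none) k k
      if k' = m then true
      else kmpLoop s m (i + 1) (pi ++ [k']) k'
    else false
  termination_by i _ _ => s.length - i

def check_repeated_pattern_alt (move_history : List Int) (pattern_length : Int) : Bool :=
  let n : Int := move_history.length
  if pattern_length ≤ 0 || n < 2 * pattern_length then false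
  else
    let pattern := PySem.List.slice move_history (some (n - pattern_length)) none
    let text := PySem.List.slice move_history none (some (n - pattern_length - 1))
    let s := pattern.map some ++ [none] ++ text.map some
    kmpLoop s pattern_length.toNat 1 [0] 0

-- ===== PRECONDITION & SPEC =====
-- For pattern_length < 0, A's result is an accident of Python's negative-slice wraparound
-- (it can return True although no block repeats); B returns False there, the intended value
-- since no pattern of negative length exists.
def D_check_repeated_pattern (move_history : List Int) (pattern_length : Int) : Prop :=
  pattern_length < 0
instance (move_history : List Int) (pattern_length : Int) : Decidable (D_check_repeated_pattern move_history pattern_length) := by unfold D_check_repeated_pattern; infer_instance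

def Spec_check_repeated_pattern (move_history : List Int) (pattern_length : Int) (out : Bool) : Prop := ¬ D_check_repeated_pattern move_history pattern_length → out = check_repeated_pattern_alt move_history pattern_length
instance (move_history : List Int) (pattern_length : Int) (out : Bool) : Decidable (Spec_check_repeated_pattern move_history pattern_length out) := by unfold Spec_check_repeated_pattern; infer_instance

def pvDiffWitness_check_repeated_pattern : List Int × Int := ([], -1)
def pvDiffWitnessOut_check_repeated_pattern : Bool × Bool := (true, false)

-- ===== CLAIM (what is proved, stated in full; the proofs are below) =====
def Claim_unchanged_check_repeated_pattern : Prop := ∀ (move_history : List Int) (pattern_length : Int), Dom_check_repeated_pattern move_history pattern_length → Spec_check_repeated_pattern move_history pattern_length (check_repeated_pattern move_history pattern_length)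
def Claim_changed_check_repeated_pattern : Prop := Dom_check_repeated_pattern (pvDiffWitness_check_repeated_pattern.1) (pvDiffWitness_check_repeated_pattern.2) ∧ D_check_repeated_pattern (pvDiffWitness_check_repeated_pattern.1) (pvDiffWitness_check_repeated_pattern.2) ∧ check_repeated_pattern (pvDiffWitness_check_repeated_pattern.1) (pvDiffWitness_check_repeated_pattern.2) = pvDiffWitnessOut_check_repeated_pattern.1 ∧ check_repeated_pattern_alt (pvDiffWitness_check_repeated_pattern.1) (pvDiffWitness_check_repeated_pattern.2) = pvDiffWitnessOut_check_repeated_pattern.2 ∧ pvDiffWitnessOut_check_repeated_pattern.1 ≠ pvDiffWitnessOut_check_repeated_pattern.2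

-- ===== LEMMAS AND PROOFS =====

-- b is a (proper) border of u: the prefix of length b is also a suffix
def Bord (u : List (Option Int)) (b : Nat) : Prop :=
  b < u.length ∧ u.take b = u.drop (u.length - b)

-- longest proper border of u (0 if none / u empty)
def mb (u : List (Option Int)) : Nat :=
  Nat.findGreatest (fun b => b < u.length ∧ u.take b = u.drop (u.length - b)) (u.length - 1)

theorem bord_zero (u : List (Option Int)) (hu : u ≠ []) : Bord u 0 := by
  refine ⟨by cases u with | nil => exact absurd rfl hu | cons a l => simp, ?_⟩
  simp

theorem mb_bord (u : List (Option Int)) (hu : u ≠ []) : Bord u (mb u) := by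
  have h0 : Bord u 0 := bord_zero u hu
  exact Nat.findGreatest_spec (Nat.zero_le _) h0

theorem bord_le_mb (u : List (Option Int)) (b : Nat) (hb : Bord u b) : b ≤ mb u := by
  exact Nat.le_findGreatest (by have := hb.1; omega) hb

theorem mb_lt_length (u : List (Option Int)) (hu : u ≠ []) : mb u < u.length :=
  (mb_bord u hu).1

-- a border of a border-prefix is a border
theorem bord_of_bord_take (u : List (Option Int)) (b c : Nat)
    (hb : Bord u b) (hc : Bord (u.take b) c) : Bord u c := by
  obtain ⟨hb1, hb2⟩ := hb
  obtain ⟨hc1, hc2⟩ := hc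
  rw [List.length_take] at hc1
  have hcb : c < b := by omega
  refine ⟨by omega, ?_⟩
  have hlen : (u.take b).length = b := by rw [List.length_take]; omega
  have h1 : (u.take b).take c = u.take c := by rw [List.take_take]; congr 1; omega
  have h2 : (u.take b).drop (b - c) = u.drop (u.length - c) := by
    rw [hb2, List.drop_drop]
    congr 1
    omega
  rw [hlen] at hc2
  rw [← h1, hc2, h2]

-- a border shorter than another border is a border of the longer border-prefix
theorem bord_take_of_bord (u : List (Option Int)) (b c : Nat)
    (hb : Bord u b) (hc : Bord u c) (hcb : c < b) : Bord (u.take b) c := by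
  obtain ⟨hb1, hb2⟩ := hb
  obtain ⟨hc1, hc2⟩ := hc
  refine ⟨by rw [List.length_take]; omega, ?_⟩
  have h1 : (u.take b).take c = u.take c := by rw [List.take_take]; congr 1; omega
  have hlen : (u.take b).length = b := by rw [List.length_take]; omega
  rw [h1, hlen, hc2, hb2, List.drop_drop]
  congr 1
  omega

-- snoc characterization of positive borders
theorem bord_snoc (u : List (Option Int)) (a : Option Int) (b : Nat) :
    Bord (u ++ [a]) (b + 1) ↔ Bord u b ∧ u[b]? = some a := by
  unfold Bord
  simp only [List.length_append, List.length_cons, List.length_nil]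
  constructor
  · rintro ⟨h1, h2⟩
    have hb : b < u.length := by omega
    rw [show u.length + 0 + 1 - (b + 1) = u.length - b from by omega,
        List.take_append_of_le_length (by omega),
        List.drop_append_of_le_length (by omega), List.take_add_one,
        List.getElem?_eq_getElem hb] at h2
    have h2' : u.take b ++ [u[b]] = u.drop (u.length - b) ++ [a] := by simpa using h2
    obtain ⟨e1, e2⟩ := List.append_inj h2' (by simp; omega)
    have e2' : u[b] = a := by simpa using e2
    exact ⟨⟨hb, e1⟩, by rw [List.getElem?_eq_getElem hb, e2']⟩
  · rintro ⟨⟨hb, hbd⟩, hba⟩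
    refine ⟨by omega, ?_⟩
    rw [show u.length + 0 + 1 - (b + 1) = u.length - b from by omega,
        List.take_append_of_le_length (by omega),
        List.drop_append_of_le_length (by omega), List.take_add_one, hba, hbd]
    simp

-- extending by one letter grows the longest border by at most one
theorem mb_snoc_le (u : List (Option Int)) (a : Option Int) :
    mb (u ++ [a]) ≤ mb u + 1 := by
  cases hr : mb (u ++ [a]) with
  | zero => omega
  | succ r =>
    have hb : Bord (u ++ [a]) (r + 1) := by rw [← hr]; exact mb_bord _ (by simp)
    have := (bord_snoc u a r).mp hb
    have := bord_le_mb u r this.1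
    omega

theorem take_snoc_getD (s : List (Option Int)) (i : Nat) (hi : i < s.length) :
    s.take (i + 1) = s.take i ++ [s.getD i none] := by
  rw [List.take_add_one]
  congr 1
  rw [List.getD_eq_getElem?_getD, List.getElem?_eq_getElem hi]
  simp

theorem kmpStep_zero (s : List (Option Int)) (pi : List Nat) (c : Option Int)
    (fuel : Nat) : kmpStep s pi c fuel 0 = if c = s.getD 0 none then 1 else 0 := by
  cases fuel <;> rfl

theorem take_getElem? (s : List (Option Int)) (i k : Nat) (h : k < i) :
    (s.take i)[k]? = s[k]? := by
  rw [List.getElem?_take, if_pos h]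

theorem getElem?_getD (s : List (Option Int)) (idx : Nat) (h : idx < s.length) :
    s[idx]? = some (s.getD idx none) := by
  rw [List.getD_eq_getElem?_getD, List.getElem?_eq_getElem h]
  simp

-- what the exit value of the fallback loop at k = 0 must be
theorem kmpStep_correct_zero (s : List (Option Int)) (i : Nat)
    (hi1 : 1 ≤ i) (hi : i < s.length)
    (hbord : Bord (s.take i) 0) (hub : mb (s.take (i + 1)) ≤ 0 + 1) :
    (if s.getD i none = s.getD 0 none then 1 else 0) = mb (s.take (i + 1)) := by
  have hsnoc : s.take (i + 1) = s.take i ++ [s.getD i none] := take_snoc_getD s i hi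
  have h0 : 0 < s.length := by omega
  have hget0 : s[0]? = some (s.getD 0 none) := by
    rw [List.getD_eq_getElem?_getD, List.getElem?_eq_getElem h0]
    simp
  by_cases ha : s.getD i none = s.getD 0 none
  · rw [if_pos ha]
    have hbv : Bord (s.take (i + 1)) 1 := by
      rw [hsnoc]
      refine (bord_snoc _ _ _).mpr ⟨hbord, ?_⟩
      rw [take_getElem? s i 0 (by omega), hget0, ha]
    have := bord_le_mb _ _ hbv
    omega
  · rw [if_neg ha]
    rcases Nat.eq_zero_or_pos (mb (s.take (i + 1))) with h | h
    · omega
    · exfalso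
      have hr1 : mb (s.take (i + 1)) = 1 := by omega
      have hbv0 : Bord (s.take (i + 1)) (mb (s.take (i + 1))) := by
        apply mb_bord
        intro hemp
        have hL : (s.take (i + 1)).length = 0 := by rw [hemp]; rfl
        rw [List.length_take] at hL
        omega
      rw [hr1] at hbv0
      have hbv : Bord (s.take (i + 1)) 1 := hbv0
      rw [hsnoc] at hbv
      obtain ⟨_, hget⟩ := (bord_snoc _ _ _).mp hbv
      rw [take_getElem? s i 0 (by omega), hget0] at hget
      exact ha (by simpa using hget.symm)

theorem kmpStep_correct (s : List (Option Int)) (pi : List Nat) (i : Nat)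
    (hi1 : 1 ≤ i) (hi : i < s.length)
    (hpi : ∀ j, j + 1 < i → pi.getD j 0 = mb (s.take (j + 1))) :
    ∀ fuel k, k ≤ fuel → Bord (s.take i) k → mb (s.take (i + 1)) ≤ k + 1 →
      kmpStep s pi (s.getD i none) fuel k = mb (s.take (i + 1)) := by
  intro fuel
  induction fuel with
  | zero =>
    intro k hk hbord hub
    have hk0 : k = 0 := by omega
    subst hk0
    rw [kmpStep_zero]
    exact kmpStep_correct_zero s i hi1 hi hbord hub
  | succ f ih =>
    intro k hk hbord hub
    cases k with
    | zero =>
      rw [kmpStep_zero]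
      exact kmpStep_correct_zero s i hi1 hi hbord hub
    | succ k =>
      have hlen : (s.take i).length = i := by rw [List.length_take]; omega
      have hki : k + 1 < i := by have := hbord.1; omega
      have hsnoc : s.take (i + 1) = s.take i ++ [s.getD i none] := take_snoc_getD s i hi
      by_cases ha : s.getD i none = s.getD (k + 1) none
      · rw [show kmpStep s pi (s.getD i none) (f + 1) (k + 1)
            = if s.getD i none = s.getD (k + 1) none then k + 2
              else kmpStep s pi (s.getD i none) f (pi.getD k 0) from rfl, if_pos ha]
        have hget : (s.take i)[k + 1]? = some (s.getD i none) := by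
          rw [take_getElem? s i (k + 1) hki,
            getElem?_getD s (k + 1) (show k + 1 < s.length by omega), ha]
        have hbv : Bord (s.take (i + 1)) (k + 2) := by
          rw [hsnoc]
          exact (bord_snoc _ _ _).mpr ⟨hbord, hget⟩
        have := bord_le_mb _ _ hbv
        omega
      · rw [show kmpStep s pi (s.getD i none) (f + 1) (k + 1)
            = if s.getD i none = s.getD (k + 1) none then k + 2
              else kmpStep s pi (s.getD i none) f (pi.getD k 0) from rfl, if_neg ha]
        have hpik : pi.getD k 0 = mb (s.take (k + 1)) := hpi k hki
        have htk : (s.take i).take (k + 1) = s.take (k + 1) := by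
          rw [List.take_take]; congr 1; omega
        have htklen : (s.take (k + 1)).length = k + 1 := by
          rw [List.length_take]; omega
        have htkne : s.take (k + 1) ≠ [] := by
          intro h; rw [h] at htklen; simp at htklen
        have hkle : mb (s.take (k + 1)) ≤ k := by
          have := mb_lt_length _ htkne; omega
        have hbordk : Bord (s.take i) (pi.getD k 0) := by
          rw [hpik]
          apply bord_of_bord_take (s.take i) (k + 1) _ hbord
          rw [htk]
          exact mb_bord _ htkne
        have hubk : mb (s.take (i + 1)) ≤ pi.getD k 0 + 1 := by
          rw [hpik]
          have hrk1 : mb (s.take (i + 1)) ≤ k + 1 := by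
            rcases Nat.lt_or_ge (mb (s.take (i + 1))) (k + 2) with h | h
            · omega
            · exfalso
              have hreq : mb (s.take (i + 1)) = k + 2 := by omega
              have hbv : Bord (s.take (i + 1)) (k + 2) := by
                rw [← hreq]
                apply mb_bord
                intro hemp
                have : (s.take (i + 1)).length = 0 := by rw [hemp]; rfl
                rw [List.length_take] at this
                omega
              rw [hsnoc] at hbv
              obtain ⟨_, hget⟩ := (bord_snoc _ _ _).mp hbv
              rw [take_getElem? s i (k + 1) hki,
                getElem?_getD s (k + 1) (show k + 1 < s.length by omega)] at hget
              exact ha (Option.some.inj hget).symm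
          rcases Nat.eq_zero_or_pos (mb (s.take (i + 1))) with h0 | hpos
          · omega
          · obtain ⟨r, hr⟩ : ∃ r, mb (s.take (i + 1)) = r + 1 :=
              ⟨mb (s.take (i + 1)) - 1, by omega⟩
            have hbv : Bord (s.take (i + 1)) (r + 1) := by
              rw [← hr]
              apply mb_bord
              intro hemp
              have : (s.take (i + 1)).length = 0 := by rw [hemp]; rfl
              rw [List.length_take] at this
              omega
            rw [hsnoc] at hbv
            obtain ⟨hbu, _⟩ := (bord_snoc _ _ _).mp hbv
            have hrk : r < k + 1 := by omega
            have hx : Bord (List.take (k + 1) s) r := htk ▸ bord_take_of_bord _ _ _ hbord hbu hrk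
            have := bord_le_mb _ _ hx
            omega
        exact ih (pi.getD k 0) (by omega) hbordk hubk

theorem kmpLoop_correct (s : List (Option Int)) (m : Nat) :
    ∀ i pi k, 1 ≤ i → i ≤ s.length →
      pi.length = i → (∀ j, j < i → pi.getD j 0 = mb (s.take (j + 1))) →
      k = mb (s.take i) →
      (∀ j, j < i → mb (s.take (j + 1)) ≠ m) →
      (kmpLoop s m i pi k = true ↔ ∃ j, j < s.length ∧ mb (s.take (j + 1)) = m) := by
  intro i
  induction hn : s.length - i using Nat.strong_induction_on generalizing i with
  | _ n ihn =>
  intro pi k hi1 hile hplen hpi hk hnom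
  rw [kmpLoop]
  by_cases hi : i < s.length
  · rw [dif_pos hi]
    have htine : s.take i ≠ [] := by
      intro h
      have hL : (s.take i).length = 0 := by rw [h]; rfl
      rw [List.length_take] at hL
      omega
    have hksnoc : s.take (i + 1) = s.take i ++ [s.getD i none] := take_snoc_getD s i hi
    have hkstep : kmpStep s pi (s.getD i none) k k = mb (s.take (i + 1)) := by
      apply kmpStep_correct s pi i hi1 hi (fun j hj => hpi j (by omega)) k k le_rfl
      · rw [hk]; exact mb_bord _ htine
      · rw [hk, hksnoc]
        exact mb_snoc_le _ _
    rw [hkstep]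
    by_cases hm' : mb (s.take (i + 1)) = m
    · rw [if_pos hm']
      simp only [true_iff]
      exact ⟨i, hi, hm'⟩
    · rw [if_neg hm']
      refine ihn (s.length - (i + 1)) (by omega) (i + 1) rfl _ _ (by omega) (by omega)
        (by simp [hplen]) ?_ rfl ?_
      · intro j hj
        rcases Nat.lt_or_ge j i with hji | hji
        · rw [List.getD_append _ _ _ _ (by omega)]
          exact hpi j hji
        · have hj' : j = i := by omega
          subst hj'
          rw [List.getD_append_right _ _ _ _ (by omega), hplen, Nat.sub_self]
          rfl
      · intro j hj
        rcases Nat.lt_or_ge j i with hji | hji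
        · exact hnom j hji
        · have hj' : j = i := by omega
          subst hj'
          exact hm'
  · rw [dif_neg hi]
    simp only [Bool.false_eq_true, false_iff]
    rintro ⟨j, hjs, hjm⟩
    exact hnom j (by omega) hjm

-- occurrence characterization of the prefix function hitting m on P ++ none :: T
theorem occ_iff (pat txt : List Int) (hm : 1 ≤ pat.length) :
    (∃ j, j < (pat.map some ++ [none] ++ txt.map (some : Int → Option Int)).length ∧
      mb ((pat.map some ++ [none] ++ txt.map some).take (j + 1)) = pat.length) ↔
    ∃ t, t + pat.length ≤ txt.length ∧ (txt.drop t).take pat.length = pat := by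
  set m := pat.length with hmdef
  set P : List (Option Int) := pat.map some with hPdef
  set T : List (Option Int) := txt.map some with hTdef
  set s : List (Option Int) := P ++ [none] ++ T with hsdef
  have hPlen : P.length = m := by rw [hPdef, List.length_map]
  have hTlen : T.length = txt.length := by rw [hTdef, List.length_map]
  have hlen1 : (P ++ [none]).length = m + 1 := by simp [hPlen]
  have hslen : s.length = m + 1 + txt.length := by
    rw [hsdef, List.length_append, hlen1, hTlen]
  have htakem : s.take m = P := by
    rw [hsdef, List.take_append_of_le_length (by rw [hlen1]; omega),
        List.take_append_of_le_length (by omega), ← hPlen, List.take_length]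
  have hdropq : ∀ q : Nat, s.drop (m + 1 + q) = T.drop q := by
    intro q
    rw [hsdef, List.drop_append, List.drop_eq_nil_of_le (by rw [hlen1]; omega), hlen1,
        List.nil_append]
    congr 1
    omega
  have hsm : s[m]? = some none := by
    rw [hsdef, List.getElem?_append, if_pos (by rw [hlen1]; omega), List.getElem?_append,
        if_neg (by omega), hPlen, Nat.sub_self]
    rfl
  have hsidx : ∀ idx, idx < m → s[idx]? = some (some pat[idx]!) := by
    intro idx h
    rw [hsdef, List.getElem?_append, if_pos (by rw [hlen1]; omega), List.getElem?_append,
        if_pos (by omega), hPdef, List.getElem?_map,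
        List.getElem?_eq_getElem (show idx < pat.length by omega)]
    simp [List.getElem!_eq_getElem?_getD, List.getElem?_eq_getElem (show idx < pat.length by omega)]
  have hsnone : ∀ idx, idx < s.length → s[idx]? = some none → idx = m := by
    intro idx hidx h
    by_contra hne
    rcases Nat.lt_or_ge idx m with hlt | hge
    · rw [hsidx idx hlt] at h
      simp at h
    · have hgt : m + 1 ≤ idx := by omega
      have hx : s[idx]? = T[idx - (m + 1)]? := by
        rw [hsdef, List.getElem?_append, if_neg (by rw [hlen1]; omega), hlen1]
      rw [hx, hTdef, List.getElem?_map,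
          List.getElem?_eq_getElem (show idx - (m + 1) < txt.length by rw [hslen] at hidx; omega)] at h
      simp at h
  constructor
  · rintro ⟨j, hj, hr⟩
    have hj1 : j + 1 ≤ s.length := by omega
    have hvlen : (s.take (j + 1)).length = j + 1 := by rw [List.length_take]; omega
    have hvne : s.take (j + 1) ≠ [] := by
      intro he; rw [he] at hvlen; simp at hvlen
    have hbv := mb_bord (s.take (j + 1)) hvne
    rw [hr] at hbv
    obtain ⟨hmlt, hbeq⟩ := hbv
    rw [hvlen] at hmlt hbeq
    have hvt : (s.take (j + 1)).take m = P := by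
      rw [List.take_take, min_eq_left (by omega), htakem]
    have hsep : m + 1 ≤ j + 1 - m := by
      by_contra hlt
      rw [Nat.not_le] at hlt
      have hq1 : 1 ≤ j + 1 - m := by omega
      set i0 := m - (j + 1 - m) with hi0def
      have hi0 : i0 < m := by omega
      have hLHS : ((s.take (j + 1)).take m)[i0]? = some (some pat[i0]!) := by
        rw [take_getElem? _ m i0 hi0, take_getElem? s (j + 1) i0 (by omega), hsidx i0 hi0]
      have hRHS : ((s.take (j + 1)).drop (j + 1 - m))[i0]? = some none := by
        rw [List.getElem?_drop, take_getElem? s (j + 1) _ (by omega),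
            show j + 1 - m + i0 = m from by omega, hsm]
      rw [hbeq, hRHS] at hLHS
      simp at hLHS
    have hj2m : 2 * m ≤ j := by omega
    refine ⟨j - 2 * m, by rw [hslen] at hj; omega, ?_⟩
    have hdv : (s.take (j + 1)).drop (j + 1 - m) = (T.drop (j - 2 * m)).take m := by
      rw [List.drop_take, show j + 1 - (j + 1 - m) = m from by omega,
          show j + 1 - m = m + 1 + (j - 2 * m) from by omega, hdropq]
    rw [hvt, hdv, hTdef, ← List.map_drop, ← List.map_take, hPdef] at hbeq
    exact (List.map_injective_iff.mpr (Option.some_injective Int) hbeq).symm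
  · rintro ⟨t, ht, heq⟩
    refine ⟨2 * m + t, by rw [hslen]; omega, ?_⟩
    set j := 2 * m + t with hjdef
    have hj1 : j + 1 ≤ s.length := by rw [hslen]; omega
    have hvlen : (s.take (j + 1)).length = j + 1 := by rw [List.length_take]; omega
    have hvne : s.take (j + 1) ≠ [] := by
      intro he; rw [he] at hvlen; simp at hvlen
    have hvt : (s.take (j + 1)).take m = P := by
      rw [List.take_take, min_eq_left (by omega), htakem]
    have hvd : (s.take (j + 1)).drop (j + 1 - m) = P := by
      rw [List.drop_take, show j + 1 - (j + 1 - m) = m from by omega,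
          show j + 1 - m = m + 1 + t from by omega, hdropq, hTdef,
          ← List.map_drop, ← List.map_take, heq, hPdef]
    have hbord : Bord (s.take (j + 1)) m := by
      refine ⟨by rw [hvlen]; omega, ?_⟩
      rw [hvlen, hvt, hvd]
    have hge := bord_le_mb _ _ hbord
    have hle : mb (s.take (j + 1)) ≤ m := by
      by_contra hgt
      rw [Nat.not_le] at hgt
      have hbv := mb_bord (s.take (j + 1)) hvne
      obtain ⟨hr1, hr2⟩ := hbv
      rw [hvlen] at hr1 hr2
      set r := mb (s.take (j + 1)) with hrdef
      have hLHS : ((s.take (j + 1)).take r)[m]? = some none := by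
        rw [take_getElem? _ r m hgt, take_getElem? s (j + 1) m (by omega), hsm]
      have hRHS : ((s.take (j + 1)).drop (j + 1 - r))[m]? = s[j + 1 - r + m]? := by
        rw [List.getElem?_drop, take_getElem? s (j + 1) _ (by omega)]
      rw [hr2, hRHS] at hLHS
      have := hsnone (j + 1 - r + m) (by omega) hLHS
      omega
    omega

-- A-side windows of the truncated prefix are windows of move_history itself
theorem window_take (mh : List Int) (P i : Nat) (hi : i + P ≤ mh.length - P - 1) :
    (((mh.take (mh.length - P - 1)).drop i).take P) = ((mh.drop i).take P) := by
  rw [List.drop_take, List.take_take]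
  congr 1
  omega

theorem check_repeated_pattern_eq_alt_of_pos (mh : List Int) (p : Int) (hp : 0 < p) :
    check_repeated_pattern mh p = check_repeated_pattern_alt mh p := by
  set P : Nat := p.toNat with hPdef
  have hpP : p = (P : Int) := by omega
  have hP1 : 1 ≤ P := by omega
  by_cases h2 : (mh.length : Int) < 2 * p
  · simp only [check_repeated_pattern, check_repeated_pattern_alt]
    rw [if_pos h2, if_pos (by simp; omega)]
  · have hnP : 2 * P ≤ mh.length := by omega
    simp only [check_repeated_pattern, check_repeated_pattern_alt]
    rw [if_neg (by omega), if_neg (by simp; omega)]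
    have hlast : PySem.List.slice mh (some (-p)) none = mh.drop (mh.length - P) := by
      rw [hpP]
      exact PySem.List.slice_from_neg_natCast mh P hP1
    have hrange : (mh.length : Int) - 2 * p = ((mh.length - 2 * P : Nat) : Int) := by omega
    have hpat : PySem.List.slice mh (some ((mh.length : Int) - p)) none
        = mh.drop (mh.length - P) := by
      have hE : (mh.length : Int) - p = ((mh.length - P : Nat) : Int) := by omega
      rw [hE, PySem.List.slice_from_natCast]
    have htext : PySem.List.slice mh none (some ((mh.length : Int) - p - 1))
        = mh.take (mh.length - P - 1) := by
      have hE : (mh.length : Int) - p - 1 = ((mh.length - P - 1 : Nat) : Int) := by omega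
      rw [hE, PySem.List.slice_to_natCast]
    rw [hlast, hrange, hpat, htext, PySem.List.pyRange_zero_natCast, List.any_map,
        ← hPdef]
    set T := mh.take (mh.length - P - 1) with hTdef
    set pat := mh.drop (mh.length - P) with hpatdef
    have hTlen : T.length = mh.length - P - 1 := by rw [hTdef, List.length_take]; omega
    have hpatlen : pat.length = P := by rw [hpatdef, List.length_drop]; omega
    -- B side: the KMP pass finds exactly the occurrences of pat in T
    have hB : kmpLoop (pat.map some ++ [none] ++ T.map some) P 1 [0] 0 = true
        ↔ ∃ t, t + P ≤ T.length ∧ (T.drop t).take P = pat := by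
      set s : List (Option Int) := pat.map some ++ [none] ++ T.map some with hs
      have hslen : s.length = P + 1 + T.length := by simp [hs, hpatlen]; omega
      have htake1 : (s.take 1).length = 1 := by rw [List.length_take]; rw [hslen]; omega
      have hmb1 : mb (s.take 1) = 0 := by
        unfold mb
        rw [htake1]
        rfl
      have hchar := kmpLoop_correct s P 1 [0] 0 le_rfl (by omega) rfl
        (by intro j hj
            have hj0 : j = 0 := by omega
            subst hj0
            rw [hmb1]
            rfl)
        (by rw [hmb1])
        (by intro j hj
            have hj0 : j = 0 := by omega
            subst hj0
            rw [hmb1]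
            omega)
      rw [hchar]
      have := occ_iff pat T (by omega)
      rw [hpatlen] at this
      exact this
    rw [Bool.eq_iff_iff, hB]
    simp only [List.any_eq_true, List.mem_range, Function.comp_apply, beq_iff_eq]
    constructor
    · rintro ⟨k, hk, hkeq⟩
      rw [hpP, PySem.List.slice_natCast_add mh k P] at hkeq
      refine ⟨k, by omega, ?_⟩
      rw [hTdef, window_take mh P k (by omega)]
      exact hkeq
    · rintro ⟨t, ht, hteq⟩
      rw [hTlen] at ht
      refine ⟨t, by omega, ?_⟩
      rw [hpP, PySem.List.slice_natCast_add mh t P, ← window_take mh P t (by omega), ← hTdef]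
      exact hteq

theorem check_repeated_pattern_eq_alt_of_zero (mh : List Int) :
    check_repeated_pattern mh 0 = check_repeated_pattern_alt mh 0 := by
  simp only [check_repeated_pattern, check_repeated_pattern_alt]
  rw [if_neg (by omega), if_pos (by simp)]
  simp only [neg_zero, mul_zero, sub_zero]
  have h0 : PySem.List.slice mh (some 0) none = mh := by
    have : (0 : Int) = ((0 : Nat) : Int) := rfl
    rw [this, PySem.List.slice_from_natCast, List.drop_zero]
  rw [h0, PySem.List.pyRange_zero_natCast, List.any_map]
  rw [Bool.eq_iff_iff]
  simp only [List.any_eq_true, List.mem_range, Function.comp_apply, beq_iff_eq]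
  constructor
  · rintro ⟨k, hk, hkeq⟩
    exfalso
    simp only [add_zero] at hkeq
    have hsl : PySem.List.slice mh (some ((k : Nat) : Int)) (some ((k : Nat) : Int))
        = (mh.drop k).take (k - k) := PySem.List.slice_natCast mh k k
    rw [Nat.sub_self, List.take_zero] at hsl
    rw [hsl] at hkeq
    rw [← hkeq] at hk
    simp at hk
  · rintro h
    simp at h

-- ===== VERDICT =====
theorem check_repeated_pattern_spec : Claim_unchanged_check_repeated_pattern := by
  intro mh p _hdom
  unfold Spec_check_repeated_pattern
  intro hD
  unfold D_check_repeated_pattern at hD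
  have hD' : 0 ≤ p := by omega
  rcases lt_or_eq_of_le hD' with hpos | hzero
  · exact check_repeated_pattern_eq_alt_of_pos mh p hpos
  · rw [← hzero]
    exact check_repeated_pattern_eq_alt_of_zero mh

theorem check_repeated_pattern_changed : Claim_changed_check_repeated_pattern := by
  unfold Claim_changed_check_repeated_pattern; decide
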